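/-
  SEGMENT .2 OF `codebook_decode_deinterleave_repeat` (0x10de09–0x10df2b + 0x10dc3e–0x10dc99 + 0x10dcad–0x10dcbd, the head of loop
  1901; stb_vorbis_fixed.c 1901–1937) SPLIT AT ITS THREE INTERIOR JOINS, and the ONE carry lemma of `Deint.Common`.

      .2a  0x10de09–0x10de2c + 0x10dc3e–0x10dc48          (10 instructions; prep_huffman, load4)
                 `while (total_decode > 0)`: `≤ 0` → the store-back (`AtStore`, cut10); otherwise
                 `if (f->valid_bits < 10) prep_huffman(f)` → the join 0x10de32 (`At2b`)
      .2b  0x10de32–0x10dec9 + 0x10dc4d–0x10dc52 + 0x10dcad–0x10dcbd   (40; codebook_decode_scalar_raw, load1 load2 load4 load8)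
                 DECODE_RAW proper: `z = c->fast_huffman[f->acc & 1023]`; `z ≥ 0`: `f->acc >>= n`, `f->valid_bits −= n`, negative →
                 `valid_bits = 0` and FALL THROUGH INTO THE `z < 0` HANDLER 0x10dc5c (`At2c`: gcc merged `var = −1` with the
                 handler); `z < 0`: `z = codebook_decode_scalar_raw(f, c)` → the join 0x10decf (`At2d`, r14d = z)
      .2c  0x10dc5c–0x10dc99                              (12; error, load1 load4)
                 the `z < 0` handler: `if (!f->bytes_in_seg) if (f->last_seg) return FALSE` (`AtFalse1`, cut11);
                 `return error(f, VORBIS_invalid_stream)` → the epilogue with eax = 0 (`AtEpilogue`, cut3)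
      .2d  0x10decf–0x10df2b                              (25; load1 load4)
                 `if (z < 0)` → 0x10dc5c (`At2c`); the clamp (FIX 5; FIX 10 → `AtFalse2`, cut12); `z *= c->dimensions`;
                 `if (c->sequence_p)` → `AtSeq` (cut6) else `[rsp+4] = z`, `i = 0` → `AtPlain` (cut7)
      10 + 40 + 12 + 25 = 87 instructions. The parent's claim `Claim2` is unchanged: `Claim2.of_parts` (pure logic).

  THE CUT ASSERTIONS are the head's own (`Common`, `Locals`, `Res.DeintInv` — `AtHead` without its rip) plus `1 ≤ total_decode`
  (`InRound2`), at 0x10decf plus "r14d is a DECODE_RAW result of `c`"; the `z < 0` handler needs `Common` only.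

  WHAT IS LIVE AT THE THREE JOINS (read off c/vorbis_f.dis):
      0x10de32  reads `[rsp+0x18]` (f), r12 (c: `[r12+rbx*2]` fast_huffman, `[r12+8]` codeword_lengths, rsi of the call); rbx, r13, r14,
                rax, rcx, rdx, rsi, rdi are written before they are read. ebp (c_inter), r15d (effective), `[rsp+8]`, `[rsp+0xc]`,
                `[rsp+0x70]`, `[rsp+0x78]` are carried to .2d and beyond.
      0x10decf  reads r14d (z), then `[rsp+8]` (p_inter), `[rsp+0xc]` (ch), ebp, r15d, `[rsp+0x70]` (len), r12. rbx, r13, rax, rcx,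
                rdx, rsi, `[rsp+4]` (a dead copy of valid_bits, written at 0x10debc) are dead.
      0x10dc5c  reads `[rsp+0x18]` (f) only; every register but rsp and r12 (kept for `Common.c`) is dead.

  THE CARRY LEMMA `Common.carry_wins`: `Deint.Common` follows the memory over stores inside ANY list of windows each of which is
  `CarryWin` (inside the footprint; off the struct at `c`, the `sorted_values` block, the table of outputs, the two ints, the
  frame's slots from `[rsp+0xc]` up — the spill slot of `f` excepted —, the text and the shadow; off `*f` OR inside the reader's
  windows `bookWins f`). `Common.carry_seg2` is its instance for the windows of segment .2 (`Seg2Wins`).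
-/
import Vorbis.Spec.Codebook.Deint
import Vorbis.Spec.CodebookCarry
import Vorbis.LabelsAt
namespace Vorbis.Spec.Deint
open X86 X86.User Asan Vorbis Vorbis.Spec

/-! ### `Codebook.SameFields` composes -/

/-- **The fields of the struct at `c` read the same across two steps** (`m1 → m2 → m3`). -/
theorem _root_.Vorbis.Codebook.SameFields.trans {m1 m2 m3 : Mem} {c : Nat} (h1 : Codebook.SameFields m1 m2 c)
    (h2 : Codebook.SameFields m2 m3 c) : Codebook.SameFields m1 m3 c := by
  constructor
  · exact h2.dimensions.trans h1.dimensions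
  · exact h2.entries.trans h1.entries
  · exact h2.codeword_lengths.trans h1.codeword_lengths
  · exact h2.minimum_value.trans h1.minimum_value
  · exact h2.delta_value.trans h1.delta_value
  · exact h2.value_bits.trans h1.value_bits
  · exact h2.lookup_type.trans h1.lookup_type
  · exact h2.sequence_p.trans h1.sequence_p
  · exact h2.sparse.trans h1.sparse
  · exact h2.lookup_values.trans h1.lookup_values
  · exact h2.multiplicands.trans h1.multiplicands
  · exact h2.codewords.trans h1.codewords
  · intro k hk
    exact (h2.fast_huffman k hk).trans (h1.fast_huffman k hk)
  · exact h2.sorted_codewords.trans h1.sorted_codewords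
  · exact h2.sorted_values.trans h1.sorted_values
  · exact h2.sorted_entries.trans h1.sorted_entries

/-! ### Where everything `Common` speaks of lies -/

/-- **Where the things a segment of codebook_decode_deinterleave_repeat must not disturb are**, as arithmetic over the entry state `e`
(one fact per object, for `omega`; nothing here depends on a later memory): the stack pointer's range; `*f`, the struct at `c`, its
`sorted_values` block, the table of outputs and the two ints are above the text, inside the data space and off the stack below
`e.rsp + 24` (the caller's stack pointer before it pushed the two arguments: `DeintPre.args`); the struct, the `sorted_values`
block, the table (`DeintApart.tableObj`) and the two ints are off `*f`. -/
structure DeintGeo (e : State) : Prop where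
  sp_lo : 0x700000 + 496 ≤ (e.reg .rsp).toNat
  sp_hi : (e.reg .rsp).toNat + 24 ≤ 0x800000
  f_st : (e.reg .rsp).toNat + 24 ≤ fOf e ∨ fOf e + 1808 ≤ 0x700000 ∨ 0x800000 ≤ fOf e
  f_lo : 0x119d40 ≤ fOf e
  f_hi : fOf e + 1808 ≤ 0xC00000
  c_st : (e.reg .rsp).toNat + 24 ≤ cOf e ∨ cOf e + 2120 ≤ 0x700000 ∨ 0x800000 ≤ cOf e
  c_lo : 0x119d40 ≤ cOf e
  c_hi : cOf e + 2120 ≤ 0xC00000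
  c_f : cOf e + 2120 ≤ fOf e ∨ fOf e + 1808 ≤ cOf e
  /-- the `sorted_values` block (with its sentinel word), when the book has one -/
  sv : 1 ≤ Codebook.sorted_entries e.mem (cOf e) →
    0x119d40 ≤ (Codebook.svBlock e.mem (cOf e)).base ∧
    (Codebook.svBlock e.mem (cOf e)).base + (Codebook.svBlock e.mem (cOf e)).size ≤ 0xC00000 ∧
    ((e.reg .rsp).toNat + 24 ≤ (Codebook.svBlock e.mem (cOf e)).base ∨
      (Codebook.svBlock e.mem (cOf e)).base + (Codebook.svBlock e.mem (cOf e)).size ≤ 0x700000 ∨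
      0x800000 ≤ (Codebook.svBlock e.mem (cOf e)).base) ∧
    ((Codebook.svBlock e.mem (cOf e)).base + (Codebook.svBlock e.mem (cOf e)).size ≤ fOf e ∨
      fOf e + 1808 ≤ (Codebook.svBlock e.mem (cOf e)).base)
  tab_st : (e.reg .rsp).toNat + 24 ≤ outsOf e ∨ outsOf e + 8 * chOf e ≤ 0x700000 ∨ 0x800000 ≤ outsOf e
  tab_lo : 0x119d40 ≤ outsOf e
  tab_hi : outsOf e + 8 * chOf e ≤ 0xC00000
  tab_f : outsOf e + 8 * chOf e ≤ fOf e ∨ fOf e + 1808 ≤ outsOf e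
  cp_st : (e.reg .rsp).toNat + 24 ≤ cpOf e ∨ cpOf e + 4 ≤ 0x700000 ∨ 0x800000 ≤ cpOf e
  cp_lo : 0x119d40 ≤ cpOf e
  cp_hi : cpOf e + 4 ≤ 0xC00000
  cp_f : cpOf e + 4 ≤ fOf e ∨ fOf e + 1808 ≤ cpOf e
  pp_st : (e.reg .rsp).toNat + 24 ≤ ppOf e ∨ ppOf e + 4 ≤ 0x700000 ∨ 0x800000 ≤ ppOf e
  pp_lo : 0x119d40 ≤ ppOf e
  pp_hi : ppOf e + 4 ≤ 0xC00000
  pp_f : ppOf e + 4 ≤ fOf e ∨ fOf e + 1808 ≤ ppOf e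

/-- **The geometry from the precondition and the frame room of `AtEntry`** (`v_entry he` on `Common.mid.atEntry` gives `he_room`:
`0x700000 + 496 ≤ e.rsp`; the upper bound is `DeintPre.args.stack.hi`). -/
theorem DeintGeo.of_pre {others : List Obj} {frames : List (Nat × FrameLayout)} {Blk : Block → Prop} {len : Nat} {e : State}
    (hpre : DeintPre others frames Blk len e) (hlo : 0x700000 + 496 ≤ (e.reg .rsp).toNat) : DeintGeo e := by
  have hargs := hpre.args
  have hoff := hpre.book.reader.shadow.offText
  have hL := hpre.book.reader.env.live
  have htop : 0x700000 < (e.reg .rsp).toNat + 24 := by omega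
  have eT : L.textHi = 0x119d40 := rfl
  have hhi : (e.reg .rsp).toNat + 24 ≤ 0x800000 := hargs.stack.hi
  -- `*f`
  have wf := hpre.book.reader.env.obj.where_ hargs hoff (by decide)
  simp only [Off.sizeof.stb_vorbis] at wf
  -- the struct at `c`
  obtain ⟨B, hB, hin⟩ := hpre.book.book
  have hsc : Site (Live (stackObjs frames ++ others)) (cOf e) 2120 := Site.of_blk hL hB hin.1 hin.2 (by decide)
  have wc := site_where hargs hoff htop hsc
  rw [eT] at wc
  have dc := hpre.book.apart.book
  simp only [vblock, Off.sizeof.stb_vorbis, Off.sizeof.Codebook] at dc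
  -- the table and the two ints
  have wt := site_where hargs hoff htop hpre.table
  have wcp := site_where hargs hoff htop hpre.cpSite
  have wpp := site_where hargs hoff htop hpre.ppSite
  rw [eT] at wt wcp wpp
  have dt : (Block.mk (outsOf e) (8 * chOf e)).disjoint (objBlock (fOf e)) := hpre.apart.tableObj
  have d1 := hpre.apart.cpObj
  have d2 := hpre.apart.ppObj
  simp only [vblock, Off.sizeof.stb_vorbis] at dt d1 d2
  -- the `sorted_values` block
  have hsv : 1 ≤ Codebook.sorted_entries e.mem (cOf e) →
      0x119d40 ≤ (Codebook.svBlock e.mem (cOf e)).base ∧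
      (Codebook.svBlock e.mem (cOf e)).base + (Codebook.svBlock e.mem (cOf e)).size ≤ 0xC00000 ∧
      ((e.reg .rsp).toNat + 24 ≤ (Codebook.svBlock e.mem (cOf e)).base ∨
        (Codebook.svBlock e.mem (cOf e)).base + (Codebook.svBlock e.mem (cOf e)).size ≤ 0x700000 ∨
        0x800000 ≤ (Codebook.svBlock e.mem (cOf e)).base) ∧
      ((Codebook.svBlock e.mem (cOf e)).base + (Codebook.svBlock e.mem (cOf e)).size ≤ fOf e ∨
        fOf e + 1808 ≤ (Codebook.svBlock e.mem (cOf e)).base) := by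
    intro hse
    have hBs := hpre.book.cb.K4.sv hse
    have hw := blk_where hL hargs hoff htop hBs (by simp only []; omega)
    rw [eT] at hw
    have dsv := hpre.book.apart.sv hse
    simp only [vblock, Off.sizeof.stb_vorbis] at dsv
    exact ⟨hw.1, hw.2.1, hw.2.2, dsv⟩
  simp only [fOf, cOf, outsOf, chOf] at wf wc wt dc dt d1 d2
  exact {
    sp_lo := hlo
    sp_hi := hhi
    f_st := wf.2.2
    f_lo := wf.1
    f_hi := wf.2.1
    c_st := wc.2.2
    c_lo := wc.1
    c_hi := wc.2.1
    c_f := by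
      simp only [fOf, cOf]
      omega
    sv := hsv
    tab_st := wt.2.2
    tab_lo := wt.1
    tab_hi := wt.2.1
    tab_f := by
      simp only [fOf, outsOf, chOf]
      omega
    cp_st := wcp.2.2
    cp_lo := wcp.1
    cp_hi := wcp.2.1
    cp_f := by
      simp only [fOf, cpOf]
      omega
    pp_st := wpp.2.2
    pp_lo := wpp.1
    pp_hi := wpp.2.1
    pp_f := by
      simp only [fOf, ppOf]
      omega }

/-! ### The carry lemma of `Common` -/

/-- **A window of memory that stores of a segment may hit without disturbing anything `Common` speaks of** (entry state `e`; the
reader's state inside `*f` excepted, which `Common.carry_wins` takes as a hypothesis): it lies inside the contract's footprint;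
it is OFF `*f` OR INSIDE ONE OF THE READER'S WINDOWS `bookWins f` (`f->acc`, `f->valid_bits`, `f->error`, what prep_huffman writes);
it misses the struct at `c`, the `sorted_values` block, the table of output pointers, the two ints, the slots
`[rsp+0CH .. rsp+80H)` of the frame (ch, outputs, the two pointers, the saved registers, the return address, `len`, `total_decode`)
EXCEPT the spill slot of `f` `[rsp+18H]` (re-stored with the same value at 10DE43H), the image's text and the shadow. -/
structure CarryWin (others : List Obj) (frames : List (Nat × FrameLayout)) (Blk : Block → Prop) (len : Nat) (e : State)
    (w : Span) : Prop where
  foot : ∃ w', w' ∈ (codebook_decode_deinterleave_repeat.spec others frames Blk len).footprint e ∧ w'.lo ≤ w.lo ∧ w.hi ≤ w'.hi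
  obj : w.hi ≤ fOf e ∨ fOf e + 1808 ≤ w.lo ∨ ∃ b, b ∈ bookWins (fOf e) ∧ b.lo ≤ w.lo ∧ w.hi ≤ b.hi
  book : cOf e + 2120 ≤ w.lo ∨ w.hi ≤ cOf e
  sv : 1 ≤ Codebook.sorted_entries e.mem (cOf e) →
    (Codebook.svBlock e.mem (cOf e)).base + (Codebook.svBlock e.mem (cOf e)).size ≤ w.lo ∨
      w.hi ≤ (Codebook.svBlock e.mem (cOf e)).base
  table : outsOf e + 8 * chOf e ≤ w.lo ∨ w.hi ≤ outsOf e
  cp : cpOf e + 4 ≤ w.lo ∨ w.hi ≤ cpOf e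
  pp : ppOf e + 4 ≤ w.lo ∨ w.hi ≤ ppOf e
  slots : w.hi ≤ (e.reg .rsp).toNat - 92 ∨ (e.reg .rsp).toNat + 24 ≤ w.lo ∨
    ((e.reg .rsp).toNat - 80 ≤ w.lo ∧ w.hi ≤ (e.reg .rsp).toNat - 72)
  text : w.hi ≤ 0x100000 ∨ 0x119d40 ≤ w.lo
  shadow : w.hi ≤ 0xC00000 ∨ 0xE00000 ≤ w.lo

/-- **A slot of the frame between `[rsp+0CH]` and the end of the argument slots, other than the spill slot of `f`, reads the same**
after stores inside windows that spare those slots (`CarryWin.slots`). `sp` = the entry stack pointer as a number. -/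
theorem carryWin_slot {m m' : Mem} {ws : List Span} (hs : Mem.SameExcept ws m m') (sp : Nat) (htop : sp + 24 ≤ 0x800000)
    (hW : ∀ w, w ∈ ws → w.hi ≤ sp - 92 ∨ sp + 24 ≤ w.lo ∨ (sp - 80 ≤ w.lo ∧ w.hi ≤ sp - 72)) (a : Word) (k : Nat)
    (h1 : sp - 92 ≤ a.toNat) (h2 : a.toNat + k ≤ sp + 24) (h3 : a.toNat + k ≤ sp - 80 ∨ sp - 72 ≤ a.toNat) :
    m'.readLE a k = m.readLE a k := by
  apply hs.readLE a k (by omega)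
  intro w hw
  have := hW w hw
  omega

/-- **`ReaderPost` when no store went into `*f`**: every window is off the object ⇒ `Bits f` and μ are those of before. -/
theorem Common.reader_off {others : List Obj} {frames : List (Nat × FrameLayout)} {Blk : Block → Prop} {len : Nat} {u₀ : State}
    {ret : Word} {e v : State} {m' : Mem} (h : Common others frames Blk len u₀ ret e v) (g : DeintGeo e) {ws : List Span}
    (hs : Mem.SameExcept ws v.mem m') (hW : ∀ w, w ∈ ws → w.hi ≤ fOf e ∨ fOf e + 1808 ≤ w.lo) :
    ReaderPost Blk len e.mem m' (fOf e) := by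
  have hf1 := g.f_hi
  have hobj : ObjSame (fOf e) v.mem m' := by
    apply ObjSame.of_sameExcept hs
    · simp only [Off.sizeof.stb_vorbis]
      omega
    · intro w hw
      have := hW w hw
      omega
  refine ⟨h.reader.bits.frame hobj, ?_⟩
  rw [mu_transfer (hobj.sub (by decide))]
  exact h.reader.mu_le

/-- **`Common` AFTER STORES INSIDE WINDOWS THAT ARE `CarryWin`** — the one frame lemma of the function's segments: the state `v'` has
the steady stack pointer, r12 = c, DF = 0 and the MXCSR masks (`abiInv`), the spill slot of `f` holds `f` (`hfslot`: by
`carryWin_slot`-style reading when no window meets it, by `u_resolve` after the re-store at 10DE43H), `ReaderPost` is chained by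
the caller (`hreader`: `Common.reader_off` when every window is off `*f`; `ReaderPost.trans` with `Reader.store_off_obj` /
`Bits.store_valid_bits` / a callee's post otherwise), and the memory of `v'` differs from that of `v` only inside windows that are
`CarryWin`. Every other clause — the saved registers, the footprint, the text, the shadow, `CodebookOK`, `BookApart`, the fields of
the struct, the slots, the table, the two ints — follows. -/
theorem Common.carry_wins {others : List Obj} {frames : List (Nat × FrameLayout)} {Blk : Block → Prop} {len : Nat} {u₀ : State}
    {ret : Word} {e v v' : State} (h : Common others frames Blk len u₀ ret e v) (g : DeintGeo e) {ws : List Span}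
    (hs : Mem.SameExcept ws v.mem v'.mem) (hW : ∀ w, w ∈ ws → CarryWin others frames Blk len e w)
    (hrsp : v'.reg .rsp = e.reg .rsp - 104) (hr12 : v'.reg .r12 = e.reg .rsi)
    (hfslot : UInt64.ofNat (v'.mem.readLE (e.reg .rsp - 80) 8) = e.reg .rdi)
    (hreader : ReaderPost Blk len e.mem v'.mem (fOf e)) (habi : abiInv v') :
    Common others frames Blk len u₀ ret e v' := by
  have htop := g.sp_hi
  have he_room := g.sp_lo
  have hslots : ∀ w, w ∈ ws → w.hi ≤ (e.reg .rsp).toNat - 92 ∨ (e.reg .rsp).toNat + 24 ≤ w.lo ∨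
      ((e.reg .rsp).toNat - 80 ≤ w.lo ∧ w.hi ≤ (e.reg .rsp).toNat - 72) :=
    fun w hw => (hW w hw).slots
  have hslot := carryWin_slot hs (e.reg .rsp).toNat htop hslots
  -- the struct at `c` is kept
  obtain ⟨B, hB, hin⟩ := h.pre.book.book
  have hok := h.pre.book.ok
  have hd1 : ∀ w, w ∈ ws → (Codebook.block (cOf e)).base + (Codebook.block (cOf e)).size ≤ w.lo ∨
      w.hi ≤ (Codebook.block (cOf e)).base := by
    intro w hw
    have := (hW w hw).book
    simp only [Off.sizeof.Codebook]
    exact this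
  have hkept : (Codebook.block (cOf e)).Kept v.mem v'.mem :=
    Block.Kept.of_sameExcept hs hd1 (Codebook.block_no_wrap hok hB hin)
  have hsf : Codebook.SameFields v.mem v'.mem (cOf e) := Codebook.SameFields.of_kept hkept
  have esv : Codebook.svBlock v.mem (cOf e) = Codebook.svBlock e.mem (cOf e) := by
    unfold Codebook.svBlock
    rw [h.book.sorted_values, h.book.sorted_entries]
  have hd2 : 1 ≤ Codebook.sorted_entries v.mem (cOf e) → ∀ w, w ∈ ws →
      (Codebook.svBlock v.mem (cOf e)).base + (Codebook.svBlock v.mem (cOf e)).size ≤ w.lo ∨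
        w.hi ≤ (Codebook.svBlock v.mem (cOf e)).base := by
    intro hse w hw
    rw [esv]
    rw [h.book.sorted_entries] at hse
    exact (hW w hw).sv hse
  -- the table and the two ints are kept
  have hkT : (Block.mk (outsOf e) (8 * chOf e)).Kept v.mem v'.mem := by
    apply Block.Kept.of_sameExcept hs
    · intro w hw
      exact (hW w hw).table
    · have := g.tab_hi
      simp only []
      omega
  have hkC : (Block.mk (cpOf e) 4).Kept v.mem v'.mem := by
    apply Block.Kept.of_sameExcept hs
    · intro w hw
      exact (hW w hw).cp
    · have := g.cp_hi
      simp only []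
      omega
  have hkP : (Block.mk (ppOf e) 4).Kept v.mem v'.mem := by
    apply Block.Kept.of_sameExcept hs
    · intro w hw
      exact (hW w hw).pp
    · have := g.pp_hi
      simp only []
      omega
  refine ⟨⟨h.mid.atEntry, hrsp, ?_, ?_, ?_, ?_, ?_, ?_, ?_, ?_, ?_, habi, ?_⟩, h.pre, hreader, ?_, ?_, ?_, ?_, hr12,
    ?_, ?_, hfslot, ?_, ?_, ?_, ?_, ?_, ?_⟩
  · rw [hslot _ 8 (by u_omega) (by u_omega) (by u_omega)]
    exact h.mid.ra
  · rw [hslot _ 8 (by u_omega) (by u_omega) (by u_omega)]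
    exact h.mid.r15
  · rw [hslot _ 8 (by u_omega) (by u_omega) (by u_omega)]
    exact h.mid.r14
  · rw [hslot _ 8 (by u_omega) (by u_omega) (by u_omega)]
    exact h.mid.r13
  · rw [hslot _ 8 (by u_omega) (by u_omega) (by u_omega)]
    exact h.mid.r12
  · rw [hslot _ 8 (by u_omega) (by u_omega) (by u_omega)]
    exact h.mid.rbp
  · rw [hslot _ 8 (by u_omega) (by u_omega) (by u_omega)]
    exact h.mid.rbx
  · -- the footprint
    apply h.mid.same.step_same hs
    intro w hw a h1 h2
    obtain ⟨w', hw', k1, k2⟩ := (hW w hw).foot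
    exact ⟨w', hw', by omega, by omega⟩
  · -- the text
    apply Mem.EqOn.step_same h.mid.code hs
    intro w hw
    have := (hW w hw).text
    have e1 : L.textLo = 0x100000 := rfl
    have e2 : L.textHi = 0x119d40 := rfl
    omega
  · -- the shadow
    apply Mem.EqOn.step_same h.mid.untouched hs
    intro w hw
    have := (hW w hw).shadow
    omega
  · exact h.cb.frame_sameExcept hok hB hin hs hd1 hd2
  · exact h.apart.frame hsf
  · exact h.book.trans hsf
  · rw [hsf.lookup_type]
    exact h.type2
  · rw [hslot _ 4 (by u_omega) (by u_omega) (by u_omega)]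
    exact h.chSlot
  · rw [hslot _ 8 (by u_omega) (by u_omega) (by u_omega)]
    exact h.outsSlot
  · rw [hslot _ 8 (by u_omega) (by u_omega) (by u_omega)]
    exact h.cpSlot
  · rw [hslot _ 8 (by u_omega) (by u_omega) (by u_omega)]
    exact h.ppSlot
  · rw [hslot _ 4 (by u_omega) (by u_omega) (by u_omega)]
    exact h.lenSlot
  · intro k hk
    have e1 := hkT.u64 (outsOf e + 8 * k) (by simp only []; omega) (by simp only []; omega)
    have e2 := h.table k hk
    simp only [Mem.ptr_eq] at e2 ⊢
    exact e1.trans e2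
  · exact (hkC.i32 (cpOf e) (Nat.le_refl _) (Nat.le_refl _)).trans h.cInt
  · exact (hkP.i32 (ppOf e) (Nat.le_refl _) (Nat.le_refl _)).trans h.pInt

/-! ### Two ways a window is `CarryWin`: the own frame, the reader's windows -/

/-- **A window of the function's own stack area below the slot of `ch`** (`[rsp+4]`, `[rsp+8]`; the return address of a check call
or of a callee at `[rsp−8]`; a callee's frame), **or inside the spill slot of `f`**, is `CarryWin`. -/
theorem CarryWin.of_stack {others : List Obj} {frames : List (Nat × FrameLayout)} {Blk : Block → Prop} {len : Nat} {e : State}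
    (g : DeintGeo e) (w : Span) (h1 : (e.reg .rsp).toNat - 496 ≤ w.lo)
    (h2 : w.hi ≤ (e.reg .rsp).toNat - 92 ∨ ((e.reg .rsp).toNat - 80 ≤ w.lo ∧ w.hi ≤ (e.reg .rsp).toNat - 72)) :
    CarryWin others frames Blk len e w := by
  have hlo := g.sp_lo
  have hhi := g.sp_hi
  refine ⟨⟨⟨(e.reg .rsp).toNat - 496, (e.reg .rsp).toNat⟩, ?_, ?_, ?_⟩, ?_, ?_, ?_, ?_, ?_, ?_, ?_, ?_, ?_⟩
  · simp only [X86.User.Spec.footprint, vspec]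
    exact List.mem_cons_self
  · exact h1
  · simp only []
    omega
  · have := g.f_st
    omega
  · have := g.c_st
    omega
  · intro hse
    have := g.sv hse
    generalize (Codebook.svBlock e.mem (cOf e)).base = b at *
    generalize (Codebook.svBlock e.mem (cOf e)).size = n at *
    omega
  · have := g.tab_st
    omega
  · have := g.cp_st
    omega
  · have := g.pp_st
    omega
  · omega
  · omega
  · omega

/-- **A window of the bit reader inside `*f`** (`bookWins f`: the footprint of prep_huffman, codebook_decode_scalar_raw and error,
and where the inline DECODE stores `f->acc`, `f->valid_bits`) is `CarryWin`: `*f` is off the stack, the struct at `c`, the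
`sorted_values` block, the table (`DeintApart.tableObj`) and the two ints. -/
theorem CarryWin.of_book {others : List Obj} {frames : List (Nat × FrameLayout)} {Blk : Block → Prop} {len : Nat} {e : State}
    (g : DeintGeo e) (w : Span) (hw : w ∈ bookWins (fOf e)) : CarryWin others frames Blk len e w := by
  have hlo := g.sp_lo
  have hhi := g.sp_hi
  have gf1 := g.f_st
  have gf2 := g.f_lo
  have gf3 := g.f_hi
  have hin : fOf e + 48 ≤ w.lo ∧ w.hi ≤ fOf e + 1784 := by
    simp only [bookWins, List.mem_cons, List.not_mem_nil, or_false] at hw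
    rcases hw with rfl | rfl | rfl | rfl | rfl <;> simp only [] <;> omega
  refine ⟨⟨w, ?_, Nat.le_refl _, Nat.le_refl _⟩, Or.inr (Or.inr ⟨w, hw, Nat.le_refl _, Nat.le_refl _⟩), ?_, ?_, ?_, ?_, ?_, ?_,
    ?_, ?_⟩
  · simp only [X86.User.Spec.footprint, vspec, deint.wins]
    apply List.mem_cons_of_mem
    apply List.mem_append_left
    apply List.mem_append_left
    exact hw
  · have := g.c_f
    omega
  · intro hse
    have := g.sv hse
    generalize (Codebook.svBlock e.mem (cOf e)).base = b at *
    generalize (Codebook.svBlock e.mem (cOf e)).size = n at *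
    omega
  · have := g.tab_f
    omega
  · have := g.cp_f
    omega
  · have := g.pp_f
    omega
  · omega
  · omega
  · omega

/-! ### The windows of segment .2 -/

/-- **The windows segment .2 may write between two of its program points**, for the entry stack pointer `sp` and the decoder object
at `f`: its own frame below the slot of `p_inter` (callee frames, return addresses, the slot `[rsp+4]`), the spill slot of `f`
(re-stored with the same value at 10DE43H), and the reader's windows of `*f` (`bookWins f`, written out). -/
def Seg2Wins (sp f : Nat) : List Span :=
  [⟨sp - 496, sp - 96⟩, ⟨sp - 80, sp - 72⟩, ⟨f + 48, f + 56⟩, ⟨f + 84, f + 96⟩, ⟨f + 136, f + 144⟩,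
   ⟨f + 1484, f + 1749⟩, ⟨f + 1752, f + 1784⟩]

/-- Every window of `Seg2Wins` is `CarryWin`. -/
theorem seg2Wins_carryWin {others : List Obj} {frames : List (Nat × FrameLayout)} {Blk : Block → Prop} {len : Nat} {e : State}
    (g : DeintGeo e) : ∀ w, w ∈ Seg2Wins (e.reg .rsp).toNat (fOf e) → CarryWin others frames Blk len e w := by
  intro w hw
  have hlo := g.sp_lo
  simp only [Seg2Wins, List.mem_cons, List.not_mem_nil, or_false] at hw
  rcases hw with rfl | rfl | hb
  · exact CarryWin.of_stack g _ (Nat.le_refl _) (Or.inl (by simp only []; omega))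
  · exact CarryWin.of_stack g _ (by simp only []; omega) (Or.inr ⟨Nat.le_refl _, Nat.le_refl _⟩)
  · apply CarryWin.of_book g
    simp only [bookWins, List.mem_cons, List.not_mem_nil, or_false]
    exact hb

/-- **`Common` after stores inside `Seg2Wins`**: `Common.carry_wins` for the windows of segment .2 — EVERY exit of every child of
the segment ends with it. `hs` is chained from the child's entry (`Mem.SameExcept.writeLE` for a push or a store,
`Reader.sameExcept_through_callee` over a call). -/
theorem Common.carry_seg2 {others : List Obj} {frames : List (Nat × FrameLayout)} {Blk : Block → Prop} {len : Nat} {u₀ : State}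
    {ret : Word} {e v v' : State} (h : Common others frames Blk len u₀ ret e v) (g : DeintGeo e)
    (hs : Mem.SameExcept (Seg2Wins (e.reg .rsp).toNat (fOf e)) v.mem v'.mem)
    (hrsp : v'.reg .rsp = e.reg .rsp - 104) (hr12 : v'.reg .r12 = e.reg .rsi)
    (hfslot : UInt64.ofNat (v'.mem.readLE (e.reg .rsp - 80) 8) = e.reg .rdi)
    (hreader : ReaderPost Blk len e.mem v'.mem (fOf e)) (habi : abiInv v') :
    Common others frames Blk len u₀ ret e v' :=
  Common.carry_wins h g hs (seg2Wins_carryWin g) hrsp hr12 hfslot hreader habi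

/-- A stack address `rsp − k` as a number. -/
theorem seg2_rsp_sub (w : Word) (k : Nat) (hk : k ≤ w.toNat) : (w - UInt64.ofNat k).toNat = w.toNat - k := by
  have hw := w.toNat_lt
  have hle : UInt64.ofNat k ≤ w := by
    rw [UInt64.le_iff_toNat_le, UInt64.toNat_ofNat', Nat.mod_eq_of_lt (by omega)]
    exact hk
  rw [UInt64.toNat_sub_of_le _ _ hle, UInt64.toNat_ofNat', Nat.mod_eq_of_lt (by omega)]

/-- **A read of a slot of the frame** (`n` bytes at `rsp − k`, at or above the slot of `p_inter` `[rsp+8]`, not the spill slot of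
`f`) **is the same after stores inside `Seg2Wins`**: `k = 96, n = 4` p_inter; `92, 4` ch; `88, 8` outputs; `72` / `64, 8` the two
pointers; `48 … 8` the saved registers. -/
theorem seg2_read_slot {e : State} {m m' : Mem} (g : DeintGeo e)
    (hs : Mem.SameExcept (Seg2Wins (e.reg .rsp).toNat (fOf e)) m m') (k n : Nat)
    (hk : (n ≤ k ∧ k ≤ 96 ∧ 80 + n ≤ k) ∨ (n ≤ k ∧ k ≤ 72)) :
    m'.readLE (e.reg .rsp - UInt64.ofNat k) n = m.readLE (e.reg .rsp - UInt64.ofNat k) n := by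
  have h1 := g.sp_lo
  have h2 := g.sp_hi
  have gf1 := g.f_st
  have ea := seg2_rsp_sub (e.reg .rsp) k (by omega)
  apply hs.readLE
  · rw [ea]
    omega
  · rw [ea]
    intro w hw
    simp only [Seg2Wins, List.mem_cons, List.not_mem_nil, or_false] at hw
    rcases hw with rfl | rfl | rfl | rfl | rfl | rfl | rfl <;> simp only [] <;> omega

/-- **A read of an argument slot** (`n` bytes at `rsp + k`, `k + n ≤ 24`: `k = 8, n = 4` len; `16, 4` total_decode) **is the same
after stores inside `Seg2Wins`**. -/
theorem seg2_read_arg {e : State} {m m' : Mem} (g : DeintGeo e)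
    (hs : Mem.SameExcept (Seg2Wins (e.reg .rsp).toNat (fOf e)) m m') (k n : Nat) (hk : k + n ≤ 24) :
    m'.readLE (e.reg .rsp + UInt64.ofNat k) n = m.readLE (e.reg .rsp + UInt64.ofNat k) n := by
  have h1 := g.sp_lo
  have h2 := g.sp_hi
  have gf1 := g.f_st
  have ea : (e.reg .rsp + UInt64.ofNat k).toNat = (e.reg .rsp).toNat + k := toNat_add_ofNat (e.reg .rsp) k (by omega)
  apply hs.readLE
  · rw [ea]
    omega
  · rw [ea]
    intro w hw
    simp only [Seg2Wins, List.mem_cons, List.not_mem_nil, or_false] at hw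
    rcases hw with rfl | rfl | rfl | rfl | rfl | rfl | rfl <;> simp only [] <;> omega

/-! ### The assertions at the three new cut points -/

/-- **The invariant of loop 1901 inside a round** (`total_decode ≥ 1` seen by the loop test 10DE09H), at any program point of
segment .2: `AtHead` without its rip, plus `1 ≤ td`. -/
structure InRound2 (others : List Obj) (frames : List (Nat × FrameLayout)) (Blk : Block → Prop) (len : Nat) (u₀ : State)
    (ret : Word) (e : State) (ci pi eff : Nat) (td : Int) (v : State) : Prop where
  /-- the frame, the precondition, `Bits f`, `CodebookOK c`, the slots that never change -/
  common : Common others frames Blk len u₀ ret e v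
  /-- ebp = c_inter, `[rsp+8]` = p_inter, r15d = effective, `[rsp+78H]` = total_decode -/
  locals : Locals e v ci pi eff td
  /-- `0 ≤ c_inter < ch`, `pos ≤ len·ch`, `1 ≤ effective ≤ dimensions` -/
  inv : Res.DeintInv ci pi (chOf e) (lenOf e) eff (dimOf e)
  /-- the loop test was passed -/
  td_pos : 1 ≤ td

/-- **`InRound2` after stores inside `Seg2Wins`**: `Common.carry_seg2`, and the four locals — ebp and r15 kept, the slot of p_inter
`[rsp+8]` and the argument slot of total_decode `[rsp+78H]` are off `Seg2Wins` (`seg2_read_slot`, `seg2_read_arg`). The exits `At2b`,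
`At2d` of the children are this lemma plus the rip (and r14d). -/
theorem InRound2.carry_seg2 {others : List Obj} {frames : List (Nat × FrameLayout)} {Blk : Block → Prop} {len : Nat} {u₀ : State}
    {ret : Word} {e v v' : State} {ci pi eff : Nat} {td : Int} (h : InRound2 others frames Blk len u₀ ret e ci pi eff td v)
    (g : DeintGeo e) (hs : Mem.SameExcept (Seg2Wins (e.reg .rsp).toNat (fOf e)) v.mem v'.mem)
    (hrsp : v'.reg .rsp = e.reg .rsp - 104) (hr12 : v'.reg .r12 = v.reg .r12) (hrbp : v'.reg .rbp = v.reg .rbp)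
    (hr15 : v'.reg .r15 = v.reg .r15) (hfslot : UInt64.ofNat (v'.mem.readLE (e.reg .rsp - 80) 8) = e.reg .rdi)
    (hreader : ReaderPost Blk len e.mem v'.mem (fOf e)) (habi : abiInv v') :
    InRound2 others frames Blk len u₀ ret e ci pi eff td v' := by
  refine ⟨Common.carry_seg2 h.common g hs hrsp (hr12.trans h.common.c) hfslot hreader habi, ⟨?_, ?_, ?_, ?_⟩, h.inv, h.td_pos⟩
  · exact hrbp.trans h.locals.ciReg
  · have r : v'.mem.readLE (e.reg .rsp - 96) 4 = v.mem.readLE (e.reg .rsp - 96) 4 := seg2_read_slot g hs 96 4 (by omega)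
    rw [r]
    exact h.locals.piSlot
  · exact hr15.trans h.locals.effReg
  · have r : v'.mem.readLE (e.reg .rsp + 16) 4 = v.mem.readLE (e.reg .rsp + 16) 4 := seg2_read_arg g hs 16 4 (by omega)
    rw [r]
    exact h.locals.tdSlot

/-- **10DE32H, the join after `if (f->valid_bits < 10) prep_huffman(f)`** (`mov r13, [rsp+18H]`, the start of DECODE_RAW proper):
the loop invariant inside a round. Reached from 10DE2CH (`jle` not taken) and from 10DC48H (`jmp` after prep_huffman's return). -/
structure At2b (others : List Obj) (frames : List (Nat × FrameLayout)) (Blk : Block → Prop) (len : Nat) (u₀ : State)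
    (ret : Word) (e : State) (ci pi eff : Nat) (td : Int) (v : State) : Prop where
  rip : v.rip = L.codebook_decode_deinterleave_repeat.at_10de32
  round : InRound2 others frames Blk len u₀ ret e ci pi eff td v

/-- **10DC5CH, the `z < 0` handler** (`if (!f->bytes_in_seg) { if (f->last_seg) return FALSE; } return error(f, 21)`): it reads
`[rsp+18H]` = f (`Common.fSlot`) only, and its exits `AtFalse1` / `AtEpilogue` (eax = 0) need "nothing but the frame and that the two
ints are untouched" (`Common.cInt`, `.pInt`). Reached from 10DC52H (`valid_bits := 0` after it went negative: falls through) and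
from 10DED2H (`js` on `z < 0`). -/
structure At2c (others : List Obj) (frames : List (Nat × FrameLayout)) (Blk : Block → Prop) (len : Nat) (u₀ : State)
    (ret : Word) (e v : State) : Prop where
  rip : v.rip = L.codebook_decode_deinterleave_repeat.at_10dc5c
  common : Common others frames Blk len u₀ ret e v

/-- **10DECFH, the join after DECODE_RAW** (`test r14d, r14d`, C line 1907 `if (z < 0)`): the loop invariant inside a round, and
r14d = `z` is a DECODE_RAW result of the book (`z = −1 ∨ 0 ≤ z < N(c)`; `N(c)` read in the ENTRY memory as `nOf e` of `Round.zd_le`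
is: the struct is not written, `Common.book`). Established by `movsx r14d, bx` 10DE6AH (the fast path: a non-negative `fast_huffman`
entry, K5) or by `mov r14d, eax` 10DCBAH (the return value of codebook_decode_scalar_raw); read by `test r14d, r14d` 10DECFH and
`imul r14d, [r12]` 10DF05H. Only the low dword of r14 is read. -/
structure At2d (others : List Obj) (frames : List (Nat × FrameLayout)) (Blk : Block → Prop) (len : Nat) (u₀ : State)
    (ret : Word) (e : State) (ci pi eff : Nat) (td : Int) (v : State) : Prop where
  rip : v.rip = L.codebook_decode_deinterleave_repeat.at_10decf
  round : InRound2 others frames Blk len u₀ ret e ci pi eff td v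
  /-- r14d = z, the result of the inline DECODE_RAW -/
  z : DecodeRawResult e.mem (cOf e) (s32 (v.reg .r14))

/-- **A DECODE_RAW result stated in a later memory is one in the entry memory**: `N(c)` is read from fields of the struct
(`Common.book`; for `At2d.z` from K5 in the current memory or from codebook_decode_scalar_raw's post at the call state). -/
theorem decodeRaw_at_entry {m0 m : Mem} {c : Nat} {q : Int} (hsf : Codebook.SameFields m0 m c)
    (h : DecodeRawResult m c q) : DecodeRawResult m0 c q := by
  unfold DecodeRawResult at h ⊢
  rw [hsf.N] at h
  exact h

/-! ### The claims of the four children -/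

/-- **Segment .2a** (10DE09H – 10DE2CH + 10DC3EH – 10DC48H; C lines 1901, 1903 first half): the loop test (`total_decode ≤ 0` → the
store-back), the load of `f->valid_bits`, `prep_huffman(f)` when it is `≤ 9` → the join 10DE32H. -/
def Claim2a (Lay : Layout) (μ : Microarch) (u₀ : State) : Prop :=
  ∀ (others : List Obj) (frames : List (Nat × FrameLayout)) (Blk : Block → Prop) (len : Nat) (ret : Word) (e u : State)
    (ci pi eff : Nat) (td : Int),
    AtHead others frames Blk len u₀ ret e ci pi eff td u →
    ReachVia Lay μ WayInv u (fun v =>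
      AtStore others frames Blk len u₀ ret e ci pi v ∨
      At2b others frames Blk len u₀ ret e ci pi eff td v)

/-- **Segment .2b** (10DE32H – 10DEC9H + 10DC4DH – 10DC52H + 10DCADH – 10DCBDH; C line 1903, DECODE_RAW proper): the fast table
(`z = c->fast_huffman[f->acc & 1023]`); `z ≥ 0`: `f->acc >>= n`, `f->valid_bits −= n` → the join 10DECFH with r14d = z, or — the
result negative — `f->valid_bits = 0` and into the `z < 0` handler 10DC5CH; `z < 0`: `z = codebook_decode_scalar_raw(f, c)` → the join. -/
def Claim2b (Lay : Layout) (μ : Microarch) (u₀ : State) : Prop :=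
  ∀ (others : List Obj) (frames : List (Nat × FrameLayout)) (Blk : Block → Prop) (len : Nat) (ret : Word) (e u : State)
    (ci pi eff : Nat) (td : Int),
    At2b others frames Blk len u₀ ret e ci pi eff td u →
    ReachVia Lay μ WayInv u (fun v =>
      At2d others frames Blk len u₀ ret e ci pi eff td v ∨
      At2c others frames Blk len u₀ ret e v)

/-- **Segment .2c** (10DC5CH – 10DC99H; C lines 1908 – 1910): the `z < 0` handler: no byte left in the segment and it is the last
one → `return FALSE` (cut11); otherwise `return error(f, VORBIS_invalid_stream)`: the epilogue with eax = 0. -/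
def Claim2c (Lay : Layout) (μ : Microarch) (u₀ : State) : Prop :=
  ∀ (others : List Obj) (frames : List (Nat × FrameLayout)) (Blk : Block → Prop) (len : Nat) (ret : Word) (e u : State),
    At2c others frames Blk len u₀ ret e u →
    ReachVia Lay μ WayInv u (fun v =>
      AtFalse1 others frames Blk len u₀ ret e v ∨
      AtEpilogue others frames Blk len u₀ ret e v)

/-- **Segment .2d** (10DECFH – 10DF2BH; C lines 1907, 1917 – 1918, 1936 – 1937, 1946): `z < 0` → the handler 10DC5CH; the clamp of
`effective` (FIX 5; FIX 10 → cut12); `z *= c->dimensions`; the `sequence_p` dispatch into one of the two arms with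
`effective' ≤ effective`. -/
def Claim2d (Lay : Layout) (μ : Microarch) (u₀ : State) : Prop :=
  ∀ (others : List Obj) (frames : List (Nat × FrameLayout)) (Blk : Block → Prop) (len : Nat) (ret : Word) (e u : State)
    (ci pi eff : Nat) (td : Int),
    At2d others frames Blk len u₀ ret e ci pi eff td u →
    ReachVia Lay μ WayInv u (fun v =>
      At2c others frames Blk len u₀ ret e v ∨
      AtFalse2 others frames Blk len u₀ ret e v ∨
      (∃ eff' zd, AtSeq others frames Blk len u₀ ret e ci pi eff' zd td v) ∨
      (∃ eff' zd, AtPlain others frames Blk len u₀ ret e ci pi eff' zd td v))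

/-- **The composition of segment .2 from its four parts**: .2a leaves to the store-back or reaches 10DE32H; .2b reaches the join
10DECFH or the `z < 0` handler; .2d leaves to an arm / cut12, or reaches the handler; .2c leaves to cut11 or the epilogue. Pure
logic (`ReachVia.trans`); no loop inside the segment (loop 1901's induction is the function's COMPOSITION). -/
theorem Claim2.of_parts {Lay : Layout} {μ : Microarch} {u₀ : State}
    (ha : Claim2a Lay μ u₀) (hb : Claim2b Lay μ u₀) (hc : Claim2c Lay μ u₀) (hd : Claim2d Lay μ u₀) : Claim2 Lay μ u₀ := by
  intro others frames Blk len ret e u ci pi eff td hat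
  -- the `z < 0` handler, for both places it is reached from
  have handler : ∀ w, At2c others frames Blk len u₀ ret e w →
      ReachVia Lay μ WayInv w (fun v =>
        AtStore others frames Blk len u₀ ret e ci pi v ∨
        (∃ eff' zd, AtSeq others frames Blk len u₀ ret e ci pi eff' zd td v) ∨
        (∃ eff' zd, AtPlain others frames Blk len u₀ ret e ci pi eff' zd td v) ∨
        AtFalse1 others frames Blk len u₀ ret e v ∨
        AtFalse2 others frames Blk len u₀ ret e v ∨
        AtEpilogue others frames Blk len u₀ ret e v) := by
    intro w hw
    refine (hc others frames Blk len ret e w hw).trans ?_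
    intro x hx
    rcases hx with hf1 | hep
    · exact ReachVia.done (Or.inr (Or.inr (Or.inr (Or.inl hf1))))
    · exact ReachVia.done (Or.inr (Or.inr (Or.inr (Or.inr (Or.inr hep)))))
  refine (ha others frames Blk len ret e u ci pi eff td hat).trans ?_
  intro wa hwa
  rcases hwa with hstore | h2b
  · exact ReachVia.done (Or.inl hstore)
  · refine (hb others frames Blk len ret e wa ci pi eff td h2b).trans ?_
    intro wb hwb
    rcases hwb with h2d | h2c
    · refine (hd others frames Blk len ret e wb ci pi eff td h2d).trans ?_
      intro wd hwd
      rcases hwd with h2c | hf2 | hseq | hplain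
      · exact handler wd h2c
      · exact ReachVia.done (Or.inr (Or.inr (Or.inr (Or.inr (Or.inl hf2)))))
      · exact ReachVia.done (Or.inr (Or.inl hseq))
      · exact ReachVia.done (Or.inr (Or.inr (Or.inl hplain)))
    · exact handler wb h2c

end Vorbis.Spec.Deint
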